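-- pv_equiv track=rewrite | github.com/MadeAgents/ColorBench | HammerEnv/src/hammer_world/env/adb_utils.py | _split_words_and_newlines
-- ===== SOURCE A (Python) =====
-- from typing import Collection, Iterable, Optional
--
-- def _split_words_and_newlines(text: str) -> Iterable[str]:
--     """Split lines of text into individual words and newline chars."""
--     lines = text.split("\n")
--     for i, line in enumerate(lines):
--         words = line.split(" ")
--         for j, word in enumerate(words):
--             if word:
--                 yield word
--             if j < len(words) - 1:
--                 yield "%s"
--         if i < len(lines) - 1:
--             yield "\n"
-- ===== SOURCE B (Python) =====
-- def _split_words_and_newlines(text):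
--     """Single character-level pass: buffer word chars; on a delimiter flush
--     the buffered word, then emit '%s' for a space or '\n' for a newline."""
--     word = []
--     for ch in text:
--         if ch == ' ' or ch == '\n':
--             if word:
--                 yield ''.join(word)
--                 word = []
--             yield '%s' if ch == ' ' else '\n'
--         else:
--             word.append(ch)
--     if word:
--         yield ''.join(word)
-- ===== Notes on version B (the rewrite author's own statement) =====
-- stated objective: alternative
-- what changed: Replaces A's split-into-lines then split-into-words nested enumerate loops with a single character-level pass that buffers word characters and flushes the buffer at each space/newline delimiter.
import Mathlib
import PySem

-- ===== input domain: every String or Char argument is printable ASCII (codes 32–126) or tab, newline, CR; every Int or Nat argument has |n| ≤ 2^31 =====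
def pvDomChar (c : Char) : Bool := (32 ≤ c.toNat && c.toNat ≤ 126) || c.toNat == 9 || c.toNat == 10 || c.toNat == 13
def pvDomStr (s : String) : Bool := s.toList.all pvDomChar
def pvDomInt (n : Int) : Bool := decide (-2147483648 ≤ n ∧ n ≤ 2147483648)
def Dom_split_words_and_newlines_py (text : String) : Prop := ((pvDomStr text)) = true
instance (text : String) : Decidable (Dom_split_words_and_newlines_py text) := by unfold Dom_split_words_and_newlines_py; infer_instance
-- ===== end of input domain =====

-- B replaces A's nested split-then-enumerate loops by one character-level pass
-- with a word buffer (objective: alternative decomposition, same cost).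
-- Both are ports of generators, compared as the list of yielded values.

-- ===== PORT A =====
-- A, step for step: split into lines on '\n', each line into words on ' ';
-- yield non-empty words, '%s' between words, '\n' between lines.
def split_words_and_newlines_py (text : String) : List String :=
  let lines := PySem.Chars.splitOn text.toList ['\n']
  (PySem.List.enumerate lines).foldl (fun acc (p : Int × List Char) =>
    let words := PySem.Chars.splitOn p.2 [' ']
    let acc := (PySem.List.enumerate words).foldl (fun acc (q : Int × List Char) =>
      let acc := if q.2 ≠ [] then acc ++ [String.ofList q.2] else acc
      if q.1 < (words.length : Int) - 1 then acc ++ ["%s"] else acc) acc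
    if p.1 < (lines.length : Int) - 1 then acc ++ ["\n"] else acc) []

-- ===== PORT B =====
-- B, step for step: fold over the characters with a word buffer; on ' ' or '\n'
-- flush the buffer and emit the marker; flush the buffer at the end.
def split_words_and_newlines_py_alt (text : String) : List String :=
  let st := text.toList.foldl (fun (st : List String × List Char) c =>
    if c = ' ' ∨ c = '\n' then
      let out := if st.2 ≠ [] then st.1 ++ [String.ofList st.2] else st.1
      (out ++ [if c = ' ' then "%s" else "\n"], [])
    else (st.1, st.2 ++ [c])) ([], [])
  if st.2 ≠ [] then st.1 ++ [String.ofList st.2] else st.1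

-- ===== PRECONDITION & SPEC =====
def Spec_split_words_and_newlines_py (text : String) (out : List String) : Prop := out = split_words_and_newlines_py_alt text
instance (text : String) (out : List String) : Decidable (Spec_split_words_and_newlines_py text out) := by unfold Spec_split_words_and_newlines_py; infer_instance

-- ===== CLAIM (what is proved, stated in full; the proofs are below) =====
def Claim_equal_split_words_and_newlines_py : Prop := ∀ (text : String), Dom_split_words_and_newlines_py text → Spec_split_words_and_newlines_py text (split_words_and_newlines_py text)

-- ===== LEMMAS AND PROOFS =====

/-- First piece and remaining pieces of splitting on a single delimiter. -/
def sp1 (d : Char) : List Char → List Char × List (List Char)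
  | [] => ([], [])
  | c :: cs =>
    let r := sp1 d cs
    if c = d then ([], r.1 :: r.2) else (c :: r.1, r.2)

/-- Yield a word only if non-empty. -/
def flushT (w : List Char) : List String := if w = [] then [] else [String.ofList w]

/-- Tokens of one list of pieces, `sep` between consecutive pieces. -/
def sepTok (f : List Char → List String) (sep : String) : List (List Char) → List String
  | [] => []
  | [l] => f l
  | l :: ls => f l ++ sep :: sepTok f sep ls

def lineTok (l : List Char) : List String :=
  sepTok flushT "%s" ((sp1 ' ' l).1 :: (sp1 ' ' l).2)

/-- Reference single-pass tokenizer (B's shape). -/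
def emit : List Char → List Char → List String
  | w, [] => flushT w
  | w, c :: cs =>
    if c = ' ' then flushT w ++ "%s" :: emit [] cs
    else if c = '\n' then flushT w ++ "\n" :: emit [] cs
    else emit (w ++ [c]) cs

lemma sepTok_cons (f sep l ls) :
    sepTok f sep (l :: ls) = f l ++ (if ls = [] then [] else sep :: sepTok f sep ls) := by
  cases ls <;> simp [sepTok]

lemma splitOn_go_step (d : Char) (fuel : Nat) (c : Char) (rest cur : List Char)
    (acc : List (List Char)) :
    PySem.Chars.splitOn.go [d] (fuel+1) (c :: rest) cur acc
      = if c = d then PySem.Chars.splitOn.go [d] fuel rest [] (cur.reverse :: acc)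
        else PySem.Chars.splitOn.go [d] fuel rest (c :: cur) acc := by
  rw [PySem.Chars.splitOn.go]
  by_cases h : c = d
  · simp [h, List.isPrefixOf]
  · simp only [List.isPrefixOf, Bool.and_true, beq_iff_eq]
    rw [if_neg (fun h' => h h'.symm), if_neg h]

lemma splitOn_go_single (d : Char) :
    ∀ (l : List Char) (fuel : Nat) (cur : List Char) (acc : List (List Char)), l.length ≤ fuel →
    PySem.Chars.splitOn.go [d] fuel l cur acc
      = acc.reverse ++ ((cur.reverse ++ (sp1 d l).1) :: (sp1 d l).2) := by
  intro l
  induction l with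
  | nil =>
    intro fuel cur acc _
    cases fuel <;> simp [PySem.Chars.splitOn.go, sp1]
  | cons c rest ih =>
    intro fuel cur acc h
    obtain ⟨n, rfl⟩ : ∃ n, fuel = n + 1 := ⟨fuel - 1, by simp at h; omega⟩
    rw [splitOn_go_step]
    have hn : rest.length ≤ n := by simp at h; omega
    by_cases hc : c = d
    · rw [if_pos hc, ih n [] _ hn]
      simp [sp1, hc]
    · rw [if_neg hc, ih n (c :: cur) acc hn]
      simp [sp1, hc]

lemma splitOn_single (d : Char) (l : List Char) :
    PySem.Chars.splitOn l [d] = (sp1 d l).1 :: (sp1 d l).2 := by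
  rw [PySem.Chars.splitOn, splitOn_go_single d l (l.length + 1) [] [] (by omega)]
  simp

lemma sp1_append_free (d : Char) (w cs : List Char) (h : d ∉ w) :
    sp1 d (w ++ cs) = (w ++ (sp1 d cs).1, (sp1 d cs).2) := by
  induction w with
  | nil => simp
  | cons c w ih =>
    simp only [List.mem_cons, not_or] at h
    simp [sp1, ih h.2, Ne.symm h.1]

/-- Inner/outer fold of port A over `enumerate` is `sepTok`. -/
lemma foldl_enum_sepTok (f : List Char → List String) (sep : String) (n : Int) :
    ∀ (ls : List (List Char)) (s : Int) (acc : List String), s + ls.length = n →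
    (PySem.List.enumerate ls s).foldl
        (fun acc p => (if (p.1 : Int) < n - 1 then (acc ++ f p.2) ++ [sep] else acc ++ f p.2)) acc
      = acc ++ sepTok f sep ls := by
  intro ls
  induction ls with
  | nil => intro s acc h; simp [PySem.List.enumerate, sepTok]
  | cons l ls ih =>
    intro s acc h
    rw [PySem.List.enumerate_cons, List.foldl_cons]
    simp only [List.length_cons] at h
    rw [sepTok_cons]
    by_cases hls : ls = []
    · subst hls
      have hs : ¬ (s < n - 1) := by simp at h; omega
      simp [hs, PySem.List.enumerate]
    · have hlen : (0:Int) < ls.length := by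
        cases ls with | nil => exact absurd rfl hls | cons a b => exact_mod_cast Nat.succ_pos b.length
      have hs : s < n - 1 := by push_cast at h hlen ⊢; omega
      rw [if_pos hs, ih (s+1) _ (by push_cast at h ⊢; omega)]
      simp [hls]

lemma flush_eq (acc : List String) (w : List Char) :
    (if w ≠ [] then acc ++ [String.ofList w] else acc) = acc ++ flushT w := by
  by_cases h : w = [] <;> simp [flushT, h]

lemma innerFold_eq (words : List (List Char)) (acc : List String) :
    (PySem.List.enumerate words).foldl (fun acc (q : Int × List Char) =>
        let acc := if q.2 ≠ [] then acc ++ [String.ofList q.2] else acc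
        if q.1 < (words.length : Int) - 1 then acc ++ ["%s"] else acc) acc
      = acc ++ sepTok flushT "%s" words := by
  have hstep : (fun acc (q : Int × List Char) =>
        let acc := if q.2 ≠ [] then acc ++ [String.ofList q.2] else acc
        if q.1 < (words.length : Int) - 1 then acc ++ ["%s"] else acc)
      = (fun acc (q : Int × List Char) =>
        if (q.1 : Int) < (words.length : Int) - 1 then (acc ++ flushT q.2) ++ ["%s"]
        else acc ++ flushT q.2) := by
    funext acc q
    simp only [flush_eq]
  rw [hstep, foldl_enum_sepTok flushT "%s" (words.length : Int) words 0 acc (by simp)]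

lemma portA_eq_linesTok (text : String) :
    split_words_and_newlines_py text
      = sepTok lineTok "\n" ((sp1 '\n' text.toList).1 :: (sp1 '\n' text.toList).2) := by
  unfold split_words_and_newlines_py
  simp only [innerFold_eq]
  have hstep : (fun acc (p : Int × List Char) =>
        let acc := acc ++ sepTok flushT "%s" (PySem.Chars.splitOn p.2 [' '])
        if p.1 < ((PySem.Chars.splitOn text.toList ['\n']).length : Int) - 1 then acc ++ ["\n"] else acc)
      = (fun acc (p : Int × List Char) =>
        if (p.1 : Int) < ((PySem.Chars.splitOn text.toList ['\n']).length : Int) - 1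
        then (acc ++ lineTok p.2) ++ ["\n"] else acc ++ lineTok p.2) := by
    funext acc p
    simp only [lineTok, splitOn_single]
  simp only [hstep]
  rw [foldl_enum_sepTok lineTok "\n" _ _ 0 [] (by simp), splitOn_single]
  simp

def stepB (st : List String × List Char) (c : Char) : List String × List Char :=
  if c = ' ' ∨ c = '\n' then
    let out := if st.2 ≠ [] then st.1 ++ [String.ofList st.2] else st.1
    (out ++ [if c = ' ' then "%s" else "\n"], [])
  else (st.1, st.2 ++ [c])

def finB (st : List String × List Char) : List String :=
  if st.2 ≠ [] then st.1 ++ [String.ofList st.2] else st.1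

lemma foldB_eq_emit :
    ∀ (cs : List Char) (out : List String) (w : List Char),
    finB (cs.foldl stepB (out, w)) = out ++ emit w cs := by
  intro cs
  induction cs with
  | nil =>
    intro out w
    simp only [List.foldl_nil, emit, finB]
    exact flush_eq out w
  | cons c cs ih =>
    intro out w
    rw [List.foldl_cons]
    by_cases hsp : c = ' '
    · subst hsp
      have h1 : stepB (out, w) ' ' = (out ++ flushT w ++ ["%s"], []) := by
        unfold stepB flushT
        by_cases h : w = [] <;> simp [h]
      rw [h1, ih]
      simp [emit]
    · by_cases hnl : c = '\n'
      · subst hnl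
        have h1 : stepB (out, w) '\n' = (out ++ flushT w ++ ["\n"], []) := by
          unfold stepB flushT
          by_cases h : w = [] <;> simp [h]
        rw [h1, ih]
        simp [emit]
      · have h1 : stepB (out, w) c = (out, w ++ [c]) := by
          unfold stepB
          simp [hsp, hnl]
        rw [h1, ih]
        simp [emit, hsp, hnl]

lemma portB_eq_emit (text : String) :
    split_words_and_newlines_py_alt text = emit [] text.toList := by
  have h : split_words_and_newlines_py_alt text
      = finB (text.toList.foldl stepB ([], [])) := rfl
  rw [h, foldB_eq_emit]
  simp

lemma lineTok_free (w : List Char) (h : ' ' ∉ w) :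
    lineTok w = flushT w := by
  have := sp1_append_free ' ' w [] h
  simp only [List.append_nil] at this
  simp [lineTok, this, sepTok, sp1]

lemma emit_eq_linesTok :
    ∀ (cs w : List Char), (' ' ∉ w) → ('\n' ∉ w) →
    emit w cs = sepTok lineTok "\n" ((sp1 '\n' (w ++ cs)).1 :: (sp1 '\n' (w ++ cs)).2) := by
  intro cs
  induction cs with
  | nil =>
    intro w hsp hnl
    have := sp1_append_free '\n' w [] hnl
    simp only [List.append_nil] at this
    simp [emit, this, sepTok, sp1, lineTok_free w hsp]
  | cons c cs ih =>
    intro w hsp hnl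
    by_cases hc : c = ' '
    · subst hc
      rw [sp1_append_free '\n' w (' ' :: cs) hnl]
      rw [show sp1 '\n' (' ' :: cs) = (' ' :: (sp1 '\n' cs).1, (sp1 '\n' cs).2) from by
        simp [sp1]]
      rw [sepTok_cons]
      have hfree1 : ' ' ∉ (w : List Char) ++ ' ' :: (sp1 '\n' cs).1 → False := by simp
      -- lineTok of (w ++ ' ' :: h) splits off w
      have hline : lineTok (w ++ ' ' :: (sp1 '\n' cs).1)
          = flushT w ++ "%s" :: lineTok (sp1 '\n' cs).1 := by
        unfold lineTok
        rw [sp1_append_free ' ' w (' ' :: (sp1 '\n' cs).1) hsp,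
          show sp1 ' ' (' ' :: (sp1 '\n' cs).1)
              = ([], (sp1 ' ' (sp1 '\n' cs).1).1 :: (sp1 ' ' (sp1 '\n' cs).1).2) from by
            simp [sp1]]
        simp [sepTok_cons, sepTok]
      rw [hline]
      have hrec := ih [] (by simp) (by simp)
      simp only [List.nil_append] at hrec
      rw [show emit w (' ' :: cs) = flushT w ++ "%s" :: emit [] cs from by simp [emit], hrec,
        sepTok_cons]
      simp
    · by_cases hc2 : c = '\n'
      · subst hc2
        rw [sp1_append_free '\n' w ('\n' :: cs) hnl,
          show sp1 '\n' ('\n' :: cs) = ([], (sp1 '\n' cs).1 :: (sp1 '\n' cs).2) from by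
            simp [sp1]]
        have hrec := ih [] (by simp) (by simp)
        simp only [List.nil_append] at hrec
        rw [show emit w ('\n' :: cs) = flushT w ++ "\n" :: emit [] cs from by simp [emit], hrec]
        simp only [List.append_nil]
        rw [show sepTok lineTok "\n" (w :: (sp1 '\n' cs).1 :: (sp1 '\n' cs).2)
            = lineTok w ++ "\n" :: sepTok lineTok "\n" ((sp1 '\n' cs).1 :: (sp1 '\n' cs).2) from by
          simp [sepTok]]
        rw [lineTok_free w hsp]
      · rw [show emit w (c :: cs) = emit (w ++ [c]) cs from by simp [emit, hc, hc2],
          ih (w ++ [c])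
            (by
              intro hm
              rcases List.mem_append.1 hm with h | h
              · exact hsp h
              · exact hc (List.mem_singleton.1 h).symm)
            (by
              intro hm
              rcases List.mem_append.1 hm with h | h
              · exact hnl h
              · exact hc2 (List.mem_singleton.1 h).symm)]
        simp

-- ===== VERDICT (by name: the statement is the Claim_ definition above) =====
theorem split_words_and_newlines_py_spec : Claim_equal_split_words_and_newlines_py := by
  intro text _
  unfold Spec_split_words_and_newlines_py
  rw [portA_eq_linesTok, portB_eq_emit,
    emit_eq_linesTok text.toList [] (by simp) (by simp)]
  rfl
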